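-- pv_equiv track=rewrite | github.com/ali-zeynali/VSE360 | VideoPlayer.py | finalize_rendered_times
-- ===== SOURCE A (Python) =====
-- def finalize_rendered_times(rendered_times, delta):
--     t = 0
--     cnt = 1
--     for i in range(len(rendered_times)):
--         if rendered_times[i] < 0:
--             rendered_times[i] = t + cnt * delta
--             cnt += 1
--         else:
--             t = rendered_times[i]
--     return rendered_times
-- ===== SOURCE B (Python) =====
-- def finalize_rendered_times(rendered_times, delta):
--     # Two-pass decomposition: one scan precomputes, for every slot, the forward-filled
--     # last non-negative value (base) and the count of negatives strictly before it (negs);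
--     # the fill itself is then a stateless pointwise comprehension. Mutates the list in
--     # place (via slice assignment) and returns it, like the original.
--     base = []
--     negs = []
--     last = 0
--     c = 0
--     for v in rendered_times:
--         negs.append(c)
--         if v < 0:
--             c += 1
--         else:
--             last = v
--         base.append(last)
--     rendered_times[:] = [b + (k + 1) * delta if v < 0 else v
--                          for v, b, k in zip(rendered_times, base, negs)]
--     return rendered_times
-- ===== Notes on version B (the rewrite author's own statement) =====
-- stated objective: alternative
-- what changed: Replaces the single stateful loop (running last-time t and counter cnt mutated while filling) by a scan that precomputes per-slot base times and cumulative negative counts, followed by a stateless pointwise comprehension assigned back in place.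
import Mathlib
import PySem

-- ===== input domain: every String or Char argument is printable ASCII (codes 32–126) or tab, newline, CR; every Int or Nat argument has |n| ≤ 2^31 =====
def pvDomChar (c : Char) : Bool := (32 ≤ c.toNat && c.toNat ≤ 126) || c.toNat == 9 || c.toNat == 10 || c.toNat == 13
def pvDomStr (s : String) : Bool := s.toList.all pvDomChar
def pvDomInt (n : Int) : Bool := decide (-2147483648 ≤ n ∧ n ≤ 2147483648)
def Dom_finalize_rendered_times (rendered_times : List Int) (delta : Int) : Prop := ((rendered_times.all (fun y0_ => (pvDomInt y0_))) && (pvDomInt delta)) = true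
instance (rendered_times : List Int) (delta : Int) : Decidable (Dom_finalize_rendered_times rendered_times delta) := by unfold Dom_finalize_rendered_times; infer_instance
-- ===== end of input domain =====

-- B replaces A's single stateful fill loop by a precomputing scan plus a stateless
-- pointwise map (objective: alternative decomposition, same cost). Equivalence is about
-- the return value; both Pythons mutate the argument list in place identically.

-- ===== PORT A =====
-- loop body of A: reads rendered_times[i]; negative slots are overwritten with t + cnt*delta
def aBody (delta : Int) (st : Int × Int × List Int) (i : Int) : Int × Int × List Int :=
  match PySem.List.pyGet? st.2.2 i with
  | some v =>
      if v < 0 then (st.1, st.2.1 + 1, st.2.2.set i.toNat (st.1 + st.2.1 * delta))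
      else (v, st.2.1, st.2.2)
  | none => st

def finalize_rendered_times (rendered_times : List Int) (delta : Int) : List Int :=
  ((PySem.List.pyRange 0 rendered_times.length 1).foldl (aBody delta) (0, 1, rendered_times)).2.2

-- ===== PORT B =====
-- scan body of B: state (last, c, base, negs)
def bBody (st : Int × Int × List Int × List Int) (v : Int) : Int × Int × List Int × List Int :=
  let negs' := st.2.2.2 ++ [st.2.1]
  let c' := if v < 0 then st.2.1 + 1 else st.2.1
  let last' := if v < 0 then st.1 else v
  (last', c', st.2.2.1 ++ [last'], negs')

def finalize_rendered_times_alt (rendered_times : List Int) (delta : Int) : List Int :=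
  let st := rendered_times.foldl bBody (0, 0, [], [])
  (rendered_times.zip (st.2.2.1.zip st.2.2.2)).map
    (fun p => if p.1 < 0 then p.2.1 + (p.2.2 + 1) * delta else p.1)

-- ===== PRECONDITION & SPEC =====
def Spec_finalize_rendered_times (rendered_times : List Int) (delta : Int) (out : List Int) : Prop := out = finalize_rendered_times_alt rendered_times delta
instance (rendered_times : List Int) (delta : Int) (out : List Int) : Decidable (Spec_finalize_rendered_times rendered_times delta out) := by unfold Spec_finalize_rendered_times; infer_instance

-- ===== CLAIM (what is proved, stated in full; the proofs are below) =====
def Claim_equal_finalize_rendered_times : Prop := ∀ (rendered_times : List Int) (delta : Int), Dom_finalize_rendered_times rendered_times delta → Spec_finalize_rendered_times rendered_times delta (finalize_rendered_times rendered_times delta)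

-- ===== LEMMAS AND PROOFS =====

-- common recursive characterisation of the fill
def ffSpec (delta t cnt : Int) : List Int → List Int
  | [] => []
  | v :: vs => if v < 0 then (t + cnt * delta) :: ffSpec delta t (cnt + 1) vs
               else v :: ffSpec delta v cnt vs

lemma loopA (delta : Int) : ∀ (vs done : List Int) (t cnt : Int),
    ((PySem.List.pyRange (done.length : Int) ((done.length : Int) + vs.length) 1).foldl
      (aBody delta) (t, cnt, done ++ vs)).2.2 = done ++ ffSpec delta t cnt vs := by
  intro vs
  induction vs with
  | nil =>
      intro done t cnt
      simp [PySem.List.pyRange_one_eq_nil, ffSpec]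
  | cons v vs ih =>
      intro done t cnt
      rw [PySem.List.pyRange_one_cons (by simp only [List.length_cons]; push_cast; omega)]
      simp only [List.foldl_cons]
      rw [show (aBody delta (t, cnt, done ++ v :: vs) (done.length : Int)) =
          (if v < 0 then (t, cnt + 1, done ++ (t + cnt * delta) :: vs) else (v, cnt, done ++ v :: vs)) by
        simp only [aBody, PySem.List.pyGet?_append_length]
        split_ifs with h
        · simp [List.set_append_right _ _ (le_refl done.length), Int.toNat_natCast]
        · rfl]
      by_cases h : v < 0
      · simp only [if_pos h, ffSpec]
        rw [List.append_cons done]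
        have h2 := ih (done ++ [t + cnt * delta]) t (cnt + 1)
        simp only [List.length_append, List.length_cons, List.length_nil,
          List.append_assoc, List.singleton_append] at h2 ⊢
        push_cast at h2 ⊢
        ring_nf at h2 ⊢
        exact h2
      · simp only [if_neg h, ffSpec]
        rw [List.append_cons done]
        have h2 := ih (done ++ [v]) v cnt
        simp only [List.length_append, List.length_cons, List.length_nil,
          List.append_assoc, List.singleton_append] at h2 ⊢
        push_cast at h2 ⊢
        ring_nf at h2 ⊢
        exact h2

lemma A_eq_ffSpec (rendered_times : List Int) (delta : Int) :
    finalize_rendered_times rendered_times delta = ffSpec delta 0 1 rendered_times := by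
  have := loopA delta rendered_times [] 0 1
  simpa [finalize_rendered_times] using this

def bfill (t : Int) : List Int → List Int
  | [] => []
  | v :: vs => (if v < 0 then t else v) :: bfill (if v < 0 then t else v) vs

def nfill (c : Int) : List Int → List Int
  | [] => []
  | v :: vs => c :: nfill (if v < 0 then c + 1 else c) vs

lemma scanB : ∀ (vs : List Int) (last c : Int) (base negs : List Int),
    (vs.foldl bBody (last, c, base, negs)).2.2.1 = base ++ bfill last vs ∧
    (vs.foldl bBody (last, c, base, negs)).2.2.2 = negs ++ nfill c vs := by
  intro vs
  induction vs with
  | nil => intro last c base negs; simp [bfill, nfill]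
  | cons v vs ih =>
      intro last c base negs
      simp only [List.foldl_cons, bBody]
      by_cases h : v < 0
      · simpa [h, bfill, nfill, List.append_assoc] using
          ih last (c + 1) (base ++ [last]) (negs ++ [c])
      · simpa [h, bfill, nfill, List.append_assoc] using
          ih v c (base ++ [v]) (negs ++ [c])

lemma zipMapB (delta : Int) : ∀ (vs : List Int) (t c : Int),
    ((vs.zip ((bfill t vs).zip (nfill c vs))).map
      (fun p => if p.1 < 0 then p.2.1 + (p.2.2 + 1) * delta else p.1))
     = ffSpec delta t (c + 1) vs := by
  intro vs
  induction vs with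
  | nil => intro t c; simp [bfill, nfill, ffSpec]
  | cons v vs ih =>
      intro t c
      by_cases h : v < 0
      · simp [bfill, nfill, ffSpec, h, ih t (c + 1)]
      · simp [bfill, nfill, ffSpec, h, ih v c]

lemma B_eq_ffSpec (rendered_times : List Int) (delta : Int) :
    finalize_rendered_times_alt rendered_times delta = ffSpec delta 0 1 rendered_times := by
  have hs := scanB rendered_times 0 0 [] []
  simp only [List.nil_append] at hs
  simp only [finalize_rendered_times_alt, hs.1, hs.2]
  simpa using zipMapB delta rendered_times 0 0

-- ===== VERDICT (by name: the statement is the Claim_ definition above) =====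
theorem finalize_rendered_times_spec : Claim_equal_finalize_rendered_times := by
  intro rendered_times delta _
  unfold Spec_finalize_rendered_times
  rw [A_eq_ffSpec, B_eq_ffSpec]
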